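-- pv_equiv track=rewrite | github.com/agusalvarez6/ScapeRoom | AcertijoTecladoRoto/logic.py | procesar_entrada_alterada
-- ===== SOURCE A (Python) =====
-- segunda_respuesta_correcta = "python"
--
-- teclado_alterado = {
--     'a': 'b', 'b': 'c', 'c': 'd', 'd': 'e', 'e': 'f',
--     'f': 'g', 'g': 'h', 'h': 'i', 'i': 'j', 'j': 'k',
--     'k': 'l', 'l': 'm', 'm': 'n', 'n': 'o', 'o': 'p',
--     'p': 'q', 'q': 'r', 'r': 's', 's': 't', 't': 'u',
--     'u': 'v', 'v': 'w', 'w': 'x', 'x': 'y', 'y': 'z',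
--     'z': 'a', ' ': ' '  # El espacio no cambia
-- }
--
-- def procesar_entrada_alterada(entrada, historial_mensajes):
--     if entrada:  # Verificar si no es None
--         entrada = entrada.lower()
--         # Cambiamos las letras según el teclado alterado
--         resultado = ''.join([teclado_alterado.get(letra, letra) for letra in entrada])
--
--         # Comprobar si la entrada alterada corresponde a la respuesta "python"
--         if resultado == segunda_respuesta_correcta:
--             historial_mensajes.append(entrada)
--             historial_mensajes.append("Firewall superado, mejorando medidas de seguridad.")
--             return 2, historial_mensajes  # Estado final, juego completado
--         else:
--             historial_mensajes.append(entrada)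
--             historial_mensajes.append("Error, código incorrecto. Intenta de nuevo.")
--     return 1, historial_mensajes
-- ===== SOURCE B (Python) =====
-- def procesar_entrada_alterada(entrada, historial_mensajes):
--     # The shift-decode of the input equals "python" exactly when the input is
--     # "oxsgnm" (each letter of "python" has a unique predecessor), so compare
--     # directly instead of building the translated string.
--     if entrada:
--         entrada = entrada.lower()
--         if entrada == "oxsgnm":
--             historial_mensajes.append(entrada)
--             historial_mensajes.append("Firewall superado, mejorando medidas de seguridad.")
--             return 2, historial_mensajes
--         historial_mensajes.append(entrada)
--         historial_mensajes.append("Error, código incorrecto. Intenta de nuevo.")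
--     return 1, historial_mensajes
-- ===== Notes on version B (the rewrite author's own statement) =====
-- stated objective: simpler
-- what changed: Removes the per-character translation loop and the 27-entry substitution dict: the decode is injective onto 'python', so B just compares the lowercased input with its unique preimage 'oxsgnm'.
import Mathlib
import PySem

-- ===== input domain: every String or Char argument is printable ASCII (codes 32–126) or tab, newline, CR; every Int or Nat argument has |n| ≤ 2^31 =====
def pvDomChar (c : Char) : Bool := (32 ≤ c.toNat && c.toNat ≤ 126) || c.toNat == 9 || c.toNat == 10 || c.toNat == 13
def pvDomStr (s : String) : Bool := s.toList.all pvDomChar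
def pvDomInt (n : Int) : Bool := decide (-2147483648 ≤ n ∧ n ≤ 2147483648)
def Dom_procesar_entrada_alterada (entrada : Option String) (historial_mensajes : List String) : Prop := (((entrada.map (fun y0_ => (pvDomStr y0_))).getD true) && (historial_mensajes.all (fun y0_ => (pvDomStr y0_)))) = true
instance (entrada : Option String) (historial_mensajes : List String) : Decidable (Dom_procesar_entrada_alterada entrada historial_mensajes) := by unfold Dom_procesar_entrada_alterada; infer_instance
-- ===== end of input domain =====

-- B replaces A's per-character shift-decode (dict lookup + join) by a direct
-- comparison with 'oxsgnm', the unique preimage of 'python' under the decode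
-- (objective: simpler). Equivalence is about the RETURN value; the Python A
-- and B both also append the same messages to historial_mensajes in place.

-- ===== PORT A =====
def teclado_alterado : PySem.Dict Char Char := PySem.Dict.ofList
  [('a','b'),('b','c'),('c','d'),('d','e'),('e','f'),
   ('f','g'),('g','h'),('h','i'),('i','j'),('j','k'),
   ('k','l'),('l','m'),('m','n'),('n','o'),('o','p'),
   ('p','q'),('q','r'),('r','s'),('s','t'),('t','u'),
   ('u','v'),('v','w'),('w','x'),('x','y'),('y','z'),
   ('z','a'),(' ',' ')]

def segunda_respuesta_correcta : String := "python"

def procesar_entrada_alterada (entrada : Option String) (historial_mensajes : List String) : Int × List String :=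
  match entrada with
  | some s =>
    if s ≠ "" then
      let e := PySem.Str.lower s
      -- ''.join([teclado_alterado.get(letra, letra) for letra in entrada])
      let resultado := String.ofList (e.toList.map (fun letra => teclado_alterado.getD letra letra))
      if resultado = segunda_respuesta_correcta then
        (2, historial_mensajes ++ [e, "Firewall superado, mejorando medidas de seguridad."])
      else
        (1, historial_mensajes ++ [e, "Error, código incorrecto. Intenta de nuevo."])
    else (1, historial_mensajes)
  | none => (1, historial_mensajes)

-- ===== PORT B =====
def procesar_entrada_alterada_alt (entrada : Option String) (historial_mensajes : List String) : Int × List String :=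
  match entrada with
  | some s =>
    if s ≠ "" then
      let e := PySem.Str.lower s
      if e = "oxsgnm" then
        (2, historial_mensajes ++ [e, "Firewall superado, mejorando medidas de seguridad."])
      else
        (1, historial_mensajes ++ [e, "Error, código incorrecto. Intenta de nuevo."])
    else (1, historial_mensajes)
  | none => (1, historial_mensajes)

-- ===== PRECONDITION & SPEC =====
def Spec_procesar_entrada_alterada (entrada : Option String) (historial_mensajes : List String) (out : Int × List String) : Prop := out = procesar_entrada_alterada_alt entrada historial_mensajes
instance (entrada : Option String) (historial_mensajes : List String) (out : Int × List String) : Decidable (Spec_procesar_entrada_alterada entrada historial_mensajes out) := by unfold Spec_procesar_entrada_alterada; infer_instance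

-- ===== CLAIM (what is proved, stated in full; the proofs are below) =====
def Claim_equal_procesar_entrada_alterada : Prop := ∀ (entrada : Option String) (historial_mensajes : List String), Dom_procesar_entrada_alterada entrada historial_mensajes → Spec_procesar_entrada_alterada entrada historial_mensajes (procesar_entrada_alterada entrada historial_mensajes)

-- ===== LEMMAS AND PROOFS =====

-- A's per-character decode.
def pvDec (c : Char) : Char := teclado_alterado.getD c c

abbrev pvKeys : List Char :=
  ['a','b','c','d','e','f','g','h','i','j','k','l','m','n','o','p','q','r','s','t','u','v','w','x','y','z',' ']

set_option maxHeartbeats 1000000 in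
lemma teclado_mk : teclado_alterado = PySem.Dict.mk
  [('a','b'),('b','c'),('c','d'),('d','e'),('e','f'),
   ('f','g'),('g','h'),('h','i'),('i','j'),('j','k'),
   ('k','l'),('l','m'),('m','n'),('n','o'),('o','p'),
   ('p','q'),('q','r'),('r','s'),('s','t'),('t','u'),
   ('u','v'),('v','w'),('w','x'),('x','y'),('y','z'),
   ('z','a'),(' ',' ')] := by decide

-- Characters not in the table decode to themselves.
lemma pvDec_not_mem (c : Char) (hc : c ∉ pvKeys) : pvDec c = c := by
  have h0 : teclado_alterado.get? c = none := by
    rw [PySem.Dict.get?_eq_none_iff_not_mem_keys, teclado_mk]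
    simpa using hc
  unfold pvDec
  rw [PySem.Dict.getD_eq_get?_getD, h0]
  rfl

-- For each letter of "python", the only character decoding to it is its predecessor.
set_option maxHeartbeats 1000000 in
lemma pvDec_p (c : Char) : pvDec c = 'p' ↔ c = 'o' := by
  by_cases hc : c ∈ pvKeys
  · unfold pvDec; rw [teclado_mk]; fin_cases hc <;> decide
  · rw [pvDec_not_mem c hc]
    constructor <;> intro h <;> (subst h; exact absurd (by decide) hc)

set_option maxHeartbeats 1000000 in
lemma pvDec_y (c : Char) : pvDec c = 'y' ↔ c = 'x' := by
  by_cases hc : c ∈ pvKeys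
  · unfold pvDec; rw [teclado_mk]; fin_cases hc <;> decide
  · rw [pvDec_not_mem c hc]
    constructor <;> intro h <;> (subst h; exact absurd (by decide) hc)

set_option maxHeartbeats 1000000 in
lemma pvDec_t (c : Char) : pvDec c = 't' ↔ c = 's' := by
  by_cases hc : c ∈ pvKeys
  · unfold pvDec; rw [teclado_mk]; fin_cases hc <;> decide
  · rw [pvDec_not_mem c hc]
    constructor <;> intro h <;> (subst h; exact absurd (by decide) hc)

set_option maxHeartbeats 1000000 in
lemma pvDec_h (c : Char) : pvDec c = 'h' ↔ c = 'g' := by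
  by_cases hc : c ∈ pvKeys
  · unfold pvDec; rw [teclado_mk]; fin_cases hc <;> decide
  · rw [pvDec_not_mem c hc]
    constructor <;> intro h <;> (subst h; exact absurd (by decide) hc)

set_option maxHeartbeats 1000000 in
lemma pvDec_o (c : Char) : pvDec c = 'o' ↔ c = 'n' := by
  by_cases hc : c ∈ pvKeys
  · unfold pvDec; rw [teclado_mk]; fin_cases hc <;> decide
  · rw [pvDec_not_mem c hc]
    constructor <;> intro h <;> (subst h; exact absurd (by decide) hc)

set_option maxHeartbeats 1000000 in
lemma pvDec_n (c : Char) : pvDec c = 'n' ↔ c = 'm' := by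
  by_cases hc : c ∈ pvKeys
  · unfold pvDec; rw [teclado_mk]; fin_cases hc <;> decide
  · rw [pvDec_not_mem c hc]
    constructor <;> intro h <;> (subst h; exact absurd (by decide) hc)

lemma pvMap_dec_eq_python (l : List Char) :
    l.map pvDec = "python".toList ↔ l = "oxsgnm".toList := by
  match l with
  | [] => simp
  | [a] => simp
  | [a,b] => simp
  | [a,b,c] => simp
  | [a,b,c,d] => simp
  | [a,b,c,d,e] => simp
  | [a,b,c,d,e,f] =>
    show [pvDec a, pvDec b, pvDec c, pvDec d, pvDec e, pvDec f] = _ ↔ _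
    simp [pvDec_p, pvDec_y, pvDec_t, pvDec_h, pvDec_o, pvDec_n]
  | a :: b :: c :: d :: e :: f :: g :: rest => simp

lemma pvResultado_iff (e : String) :
    String.ofList (e.toList.map pvDec) = segunda_respuesta_correcta ↔ e = "oxsgnm" := by
  unfold segunda_respuesta_correcta
  rw [show ("python" : String) = String.ofList "python".toList from rfl, String.ofList_inj,
      pvMap_dec_eq_python]
  constructor
  · intro h
    have := congrArg String.ofList h
    simpa using this
  · intro h; rw [h]

-- ===== VERDICT (by name: the statement is the Claim_ definition above) =====
theorem procesar_entrada_alterada_spec : Claim_equal_procesar_entrada_alterada := by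
  intro entrada historial _
  unfold Spec_procesar_entrada_alterada procesar_entrada_alterada procesar_entrada_alterada_alt
  match entrada with
  | none => rfl
  | some s =>
    by_cases hs : s = ""
    · simp [hs]
    · simp only [hs, ne_eq, not_false_iff, if_true]
      rw [show (fun letra => teclado_alterado.getD letra letra) = pvDec from rfl]
      simp only [pvResultado_iff]
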